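-- pv_equiv track=rewrite | github.com/aaryanpawar16/Public-Policy-Navigation-using-AI | Aaryna Pawar/a.py | naive_score_query_to_chunks
-- ===== SOURCE A (Python) =====
-- def naive_score_query_to_chunks(query, chunks, top_k=3):
--     q_terms = [t.lower() for t in query.split() if t.strip()]
--     scores = []
--     for c in chunks:
--         text = c["chunk_text"].lower()
--         score = sum(text.count(t) for t in q_terms)
--         scores.append(score)
--     ranked_idx = sorted(range(len(scores)), key=lambda i: scores[i], reverse=True)
--     return [chunks[i] for i in ranked_idx[:top_k] if scores[i] > 0]
-- ===== SOURCE B (Python) =====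
-- def naive_score_query_to_chunks(query, chunks, top_k=3):
--     q_terms = [t.lower() for t in query.split() if t.strip()]
--     buckets = {}
--     for c in chunks:
--         text = c["chunk_text"].lower()
--         s = sum(text.count(t) for t in q_terms)
--         if s > 0:
--             buckets.setdefault(s, []).append(c)
--     out = []
--     for s in sorted(buckets, reverse=True):
--         for c in buckets[s]:
--             if len(out) >= top_k:
--                 return out
--             out.append(c)
--     return out
-- ===== Notes on version B (the rewrite author's own statement) =====
-- stated objective: alternative
-- what changed: Replaced the full stable sort of all chunk indices with a dict of score-buckets built in one pass, whose distinct scores are walked in decreasing order with an early cut-off after top_k results; Pre_ excludes chunks without a 'chunk_text' key (A raises KeyError) and negative top_k, a corner where no top-k contract specifies a result and the two programs read the request differently.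
import Mathlib
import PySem

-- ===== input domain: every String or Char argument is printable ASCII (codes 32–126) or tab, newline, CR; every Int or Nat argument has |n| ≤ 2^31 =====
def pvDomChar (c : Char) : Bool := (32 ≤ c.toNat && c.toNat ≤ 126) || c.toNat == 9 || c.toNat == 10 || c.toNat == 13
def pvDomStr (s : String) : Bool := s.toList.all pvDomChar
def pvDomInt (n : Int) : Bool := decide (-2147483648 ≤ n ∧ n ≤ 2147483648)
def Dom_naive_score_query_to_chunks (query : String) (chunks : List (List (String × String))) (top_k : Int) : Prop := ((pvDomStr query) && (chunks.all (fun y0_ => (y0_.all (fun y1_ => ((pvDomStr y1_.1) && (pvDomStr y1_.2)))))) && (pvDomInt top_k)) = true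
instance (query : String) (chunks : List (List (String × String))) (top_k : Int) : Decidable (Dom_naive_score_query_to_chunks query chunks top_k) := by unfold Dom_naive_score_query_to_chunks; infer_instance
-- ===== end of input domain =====

-- B replaces A's full sort of all chunk indices by a dict of score-buckets walked in
-- decreasing score order with an early cut-off (objective: alternative selection strategy).

-- ===== PORT A =====
def naive_score_query_to_chunks (query : String) (chunks : List (List (String × String))) (top_k : Int) : List (List (String × String)) :=
  let q_terms := ((PySem.Str.split₀ query).filter (fun t => !(PySem.Str.strip t == ""))).map (fun t => PySem.Str.lower t)
  let scores : List Int := chunks.foldl (fun scores c =>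
    let text := PySem.Str.lower ((PySem.Dict.mk c).getD "chunk_text" "")  -- c["chunk_text"]: KeyError (missing key) excluded by Pre_
    let score : Int := (q_terms.map (fun t => (PySem.Str.count text t : Int))).sum
    scores ++ [score]) []
  let ranked_idx := PySem.List.sorted (PySem.List.pyRange 0 (PySem.List.len scores) 1) (fun i => PySem.List.pyGetD scores i 0) true
  ((PySem.List.slice ranked_idx none (some top_k)).filter (fun i => decide (0 < PySem.List.pyGetD scores i 0))).map
    (fun i => PySem.List.pyGetD chunks i [])

-- ===== PORT B =====
-- inner loop "for c in buckets[s]: if len(out) >= top_k: return out; out.append(c)"; Bool = early return taken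
def pvB_inner (k : Int) : List (List (String × String)) → List (List (String × String)) → List (List (String × String)) × Bool
  | [], out => (out, false)
  | c :: cs, out => if k ≤ (out.length : Int) then (out, true) else pvB_inner k cs (out ++ [c])

-- outer loop "for s in sorted(buckets, reverse=True): …"
def pvB_outer (k : Int) (d : PySem.Dict Int (List (List (String × String)))) : List Int → List (List (String × String)) → List (List (String × String))
  | [], out => out
  | v :: vs, out =>
      let r := pvB_inner k (d.getD v []) out
      if r.2 then r.1 else pvB_outer k d vs r.1

def naive_score_query_to_chunks_alt (query : String) (chunks : List (List (String × String))) (top_k : Int) : List (List (String × String)) :=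
  let q_terms := ((PySem.Str.split₀ query).filter (fun t => !(PySem.Str.strip t == ""))).map (fun t => PySem.Str.lower t)
  let buckets : PySem.Dict Int (List (List (String × String))) := chunks.foldl (fun d c =>
    let text := PySem.Str.lower ((PySem.Dict.mk c).getD "chunk_text" "")
    let s : Int := (q_terms.map (fun t => (PySem.Str.count text t : Int))).sum
    if 0 < s then d.modify s [] (fun b => b ++ [c]) else d) PySem.Dict.empty
  pvB_outer top_k buckets (PySem.List.sorted buckets.keys (fun v => v) true) []

-- ===== PRECONDITION & SPEC =====
-- Pre_ excludes (a) inputs where some chunk dict lacks the key "chunk_text" — there Python A raises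
-- KeyError — and (b) negative top_k, a corner where no top-k contract specifies a result: A happens to
-- return all but the last |top_k| ranked positive-score chunks (slice semantics), B returns no chunks,
-- and neither reading is the specified one.
def Pre_naive_score_query_to_chunks (query : String) (chunks : List (List (String × String))) (top_k : Int) : Prop :=
  0 ≤ top_k ∧ ∀ c ∈ chunks, ∃ p ∈ c, p.1 = "chunk_text"
instance (query : String) (chunks : List (List (String × String))) (top_k : Int) : Decidable (Pre_naive_score_query_to_chunks query chunks top_k) := by unfold Pre_naive_score_query_to_chunks; infer_instance

def pvWitness_naive_score_query_to_chunks : String × (List (List (String × String))) × Int :=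
  ("ab cd", [[("chunk_text", "xx ab yy"), ("id", "0")], [("chunk_text", "cd cd ab")], [("chunk_text", "zz")]], 2)

def Spec_naive_score_query_to_chunks (query : String) (chunks : List (List (String × String))) (top_k : Int) (out : List (List (String × String))) : Prop := out = naive_score_query_to_chunks_alt query chunks top_k
instance (query : String) (chunks : List (List (String × String))) (top_k : Int) (out : List (List (String × String))) : Decidable (Spec_naive_score_query_to_chunks query chunks top_k out) := by unfold Spec_naive_score_query_to_chunks; infer_instance

-- ===== CLAIM (what is proved, stated in full; the proofs are below) =====
def Claim_equal_naive_score_query_to_chunks : Prop := ∀ (query : String) (chunks : List (List (String × String))) (top_k : Int), Dom_naive_score_query_to_chunks query chunks top_k → Pre_naive_score_query_to_chunks query chunks top_k → Spec_naive_score_query_to_chunks query chunks top_k (naive_score_query_to_chunks query chunks top_k)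


-- ===== LEMMAS AND PROOFS =====

theorem pv_filter_range_map {α : Type} (cs : List α) (dflt : α) (p : α → Bool) :
    (((List.range cs.length).filter (fun i => p (cs.getD i dflt))).map (fun i => cs.getD i dflt)) = cs.filter p := by
  induction cs with
  | nil => simp
  | cons c cs ih =>
    simp only [List.length_cons, List.range_succ_eq_map]
    simp only [List.filter_cons, List.getD_cons_zero]
    rw [List.filter_map]
    have hcomp : ((fun i => p ((c :: cs).getD i dflt)) ∘ Nat.succ) = fun i => p (cs.getD i dflt) := by
      funext i; simp
    rw [hcomp]
    have hmm : List.map (fun i => (c :: cs).getD i dflt) (List.map Nat.succ (List.filter (fun i => p (cs.getD i dflt)) (List.range cs.length))) = List.filter p cs := by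
      rw [List.map_map]
      have h2 : ((fun i => (c :: cs).getD i dflt) ∘ Nat.succ) = fun i => cs.getD i dflt := by
        funext i; simp
      rw [h2, ih]
    by_cases hp : p c
    · simp only [hp, if_true, List.map_cons, List.getD_cons_zero, hmm]
    · simp only [hp, Bool.false_eq_true, if_false, hmm]

theorem pv_block_map {α : Type} (cs : List α) (dflt : α) (f : α → Int) (v : Int) :
    (((PySem.List.pyRange 0 (cs.length : Int) 1).filter (fun i => PySem.List.pyGetD (cs.map f) i 0 == v)).map
      (fun i => PySem.List.pyGetD cs i dflt)) = cs.filter (fun c => f c == v) := by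
  rw [PySem.List.pyRange_zero_natCast]
  rw [List.filter_map, List.map_map]
  have hf : ∀ i ∈ (List.range cs.length).filter ((fun i => PySem.List.pyGetD (cs.map f) i 0 == v) ∘ (fun k : Nat => (k : Int))), ((fun i => PySem.List.pyGetD cs i dflt) ∘ (fun k : Nat => (k : Int))) i = cs.getD i dflt := by
    intro i hi
    simp only [Function.comp]
    rw [PySem.List.pyGetD_natCast]
  rw [List.map_congr_left hf]
  have hp : ∀ i ∈ List.range cs.length, ((fun i => PySem.List.pyGetD (cs.map f) i 0 == v) ∘ (fun k : Nat => (k : Int))) i = ((fun c => f c == v) (cs.getD i dflt)) := by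
    intro i hi
    have hilt : i < cs.length := List.mem_range.mp hi
    simp only [Function.comp]
    rw [PySem.List.pyGetD_natCast]
    rw [List.getD_eq_getElem _ _ (by simpa using hilt), List.getD_eq_getElem _ _ hilt]
    simp
  rw [List.filter_congr hp]
  exact pv_filter_range_map cs dflt (fun c => f c == v)

theorem pv_insertBy_middle (before : Int → Int → Bool) (x : Int) (l1 l2 : List Int)
    (h1 : ∀ y ∈ l1, before x y = false) (h2 : ∀ c ∈ l2.head?, before x c = true) :
    PySem.List.insertBy before x (l1 ++ l2) = l1 ++ x :: l2 := by
  induction l1 with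
  | nil =>
    cases l2 with
    | nil => simp [PySem.List.insertBy]
    | cons c cs =>
      have := h2 c (by simp)
      simp [PySem.List.insertBy, this]
  | cons a l1 ih =>
    have ha := h1 a (by simp)
    simp only [List.cons_append, PySem.List.insertBy, ha]
    simp only [Bool.false_eq_true, if_false]
    rw [ih (fun y hy => h1 y (by simp [hy]))]

theorem pv_stable_sorted_rev (key : Int → Int) (xs ys : List Int)
    (hx : xs.Pairwise (· < ·)) (hperm : ys.Perm xs)
    (hys : ys.Pairwise (fun a b => key b < key a ∨ (key a = key b ∧ a < b))) :
    PySem.List.sorted xs key true = ys := by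
  induction xs using List.reverseRecOn generalizing ys with
  | nil => simpa [PySem.List.sorted] using hperm.eq_nil
  | append_singleton zs x ih =>
    have hxmem : x ∈ ys := hperm.mem_iff.mpr (by simp)
    obtain ⟨l1, l2, rfl⟩ := List.append_of_mem hxmem
    have hpairzs : zs.Pairwise (· < ·) := hx.sublist (by simp)
    have hzx : ∀ z ∈ zs, z < x := by
      intro z hz
      have := (List.pairwise_append.mp hx).2.2
      exact this z hz x (by simp)
    -- ys without x is a permutation of zs
    have hperm' : (l1 ++ l2).Perm zs := by
      have p1 : (l1 ++ x :: l2).Perm (x :: (l1 ++ l2)) := List.perm_middle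
      have p2 : (zs ++ [x]).Perm (x :: zs) := by
        simpa using List.perm_append_comm (l₁ := zs) (l₂ := [x])
      exact (p1.symm.trans (hperm.trans p2)).cons_inv
    have hsub : (l1 ++ l2).Sublist (l1 ++ x :: l2) :=
      List.Sublist.append_left (List.sublist_cons_self x l2) l1
    have hpair' := hys.sublist hsub
    have ihres := ih (l1 ++ l2) hpairzs hperm' hpair'
    rw [PySem.List.sorted_rev_eq_foldl_insertBy, List.foldl_append]
    simp only [List.foldl_cons, List.foldl_nil]
    rw [← PySem.List.sorted_rev_eq_foldl_insertBy, ihres]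
    apply pv_insertBy_middle
    · intro y hy
      have hle : key x ≤ key y := by
        have := (List.pairwise_append.mp hys).2.2 y hy x (by simp)
        rcases this with h | h
        · exact le_of_lt h
        · exact le_of_eq h.1.symm
      simp [not_lt.mpr hle]
    · intro c hc
      cases l2 with
      | nil => simp at hc
      | cons c0 cs =>
        have hcc : c = c0 := by simpa using hc.symm
        subst hcc
        have hrel : key c < key x ∨ (key x = key c ∧ x < c) := by
          have hp2 := (List.pairwise_append.mp hys).2.1
          exact (List.pairwise_cons.mp hp2).1 c (by simp)
        have hcx : c < x := by
          have hcmem : c ∈ zs := by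
            have hcm : c ∈ l1 ++ c :: cs := by simp
            exact hperm'.mem_iff.mp hcm
          exact hzx c hcmem
        rcases hrel with h | h
        · simp [h]
        · omega

theorem pv_perm_flatMap_filter (f : Int → Int) (W xs : List Int)
    (hW : W.Nodup) (hcov : ∀ x ∈ xs, f x ∈ W) :
    (W.flatMap (fun v => xs.filter (fun x => f x == v))).Perm xs := by
  induction W generalizing xs with
  | nil =>
    have : xs = [] := List.eq_nil_iff_forall_not_mem.mpr (fun x hx => by simpa using hcov x hx)
    simp [this]
  | cons v W' ih =>
    simp only [List.flatMap_cons]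
    have hxs' : ∀ v' ∈ W', xs.filter (fun x => f x == v') = (xs.filter (fun x => !(f x == v))).filter (fun x => f x == v') := by
      intro v' hv'
      have hvne : v' ≠ v := fun h => (List.nodup_cons.mp hW).1 (h ▸ hv')
      rw [List.filter_filter]
      apply List.filter_congr
      intro x hx
      by_cases h : f x = v'
      · simp only [h, beq_self_eq_true, Bool.true_and]
        simp [hvne]
      · simp [h]
    have hflat : W'.flatMap (fun v' => xs.filter (fun x => f x == v'))
        = W'.flatMap (fun v' => (xs.filter (fun x => !(f x == v))).filter (fun x => f x == v')) := by
      simp only [List.flatMap_def]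
      exact congrArg List.flatten (List.map_congr_left hxs')
    rw [hflat]
    have hcov' : ∀ x ∈ xs.filter (fun x => !(f x == v)), f x ∈ W' := by
      intro x hx
      rw [List.mem_filter] at hx
      have := hcov x hx.1
      simp at hx
      rcases List.mem_cons.mp this with h | h
      · exact absurd h hx.2
      · exact h
    have hih := ih (xs.filter (fun x => !(f x == v))) (List.nodup_cons.mp hW).2 hcov'
    exact (hih.append_left _).trans (List.filter_append_perm _ xs)

theorem pv_desc_split (W : List Int) (hW : W.Pairwise (fun a b => b < a)) :
    W = W.filter (fun v => decide (0 < v)) ++ W.filter (fun v => !(decide (0 < v))) := by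
  induction W with
  | nil => simp
  | cons v W' ih =>
    have htail := ih (List.pairwise_cons.mp hW).2
    by_cases hv : (0:Int) < v
    · simp only [List.filter_cons, hv, decide_true, Bool.not_true, Bool.false_eq_true, if_false, if_true]
      rw [List.cons_append]
      exact congrArg (v :: ·) htail
    · have hall : ∀ w ∈ W', ¬ ((0:Int) < w) := by
        intro w hw
        have := (List.pairwise_cons.mp hW).1 w hw
        omega
      have h1 : W'.filter (fun v => decide (0 < v)) = [] := by
        rw [List.filter_eq_nil_iff]
        intro w hw; simpa using hall w hw
      simp only [List.filter_cons, hv, decide_false, Bool.not_false, Bool.false_eq_true, if_false, if_true]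
      rw [h1] at htail ⊢
      simpa using htail

theorem pv_inner_spec (k : Int) (cs out : List (List (String × String))) (h : (out.length : Int) ≤ k) :
    pvB_inner k cs out = (out ++ cs.take (k.toNat - out.length), decide (k.toNat - out.length < cs.length)) := by
  induction cs generalizing out with
  | nil => simp [pvB_inner]
  | cons c cs ih =>
    by_cases hstop : k ≤ (out.length : Int)
    · have heq : (out.length : Int) = k := le_antisymm h hstop
      have hk : k.toNat = out.length := by omega
      simp [pvB_inner, hstop, hk]
    · have hlt : (out.length : Int) < k := lt_of_not_ge hstop
      simp only [pvB_inner, hstop, if_false]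
      rw [ih (out ++ [c]) (by simp; omega)]
      have hb : k.toNat - out.length = (k.toNat - (out ++ [c]).length) + 1 := by simp; omega
      rw [hb]
      simp [List.take_succ_cons, Nat.succ_lt_succ_iff]

theorem pv_outer_spec (k : Int) (d : PySem.Dict Int (List (List (String × String)))) (vs : List Int)
    (out : List (List (String × String))) (h : (out.length : Int) ≤ k) :
    pvB_outer k d vs out = out ++ (vs.flatMap (fun v => d.getD v [])).take (k.toNat - out.length) := by
  induction vs generalizing out with
  | nil => simp [pvB_outer]
  | cons v vs ih =>
    simp only [pvB_outer, List.flatMap_cons]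
    rw [pv_inner_spec k (d.getD v []) out h]
    by_cases hstop : k.toNat - out.length < (d.getD v []).length
    · simp only [hstop, decide_true, if_true]
      rw [List.take_append]
      have h0 : k.toNat - out.length - (d.getD v []).length = 0 := by omega
      rw [h0]
      simp
    · simp only [hstop, decide_false, Bool.false_eq_true, if_false]
      have htake : (d.getD v []).take (k.toNat - out.length) = d.getD v [] :=
        List.take_of_length_le (by omega)
      rw [htake]
      have hlen : ((out ++ d.getD v []).length : Int) ≤ k := by
        simp only [List.length_append]
        push_cast
        omega
      rw [ih (out ++ d.getD v []) hlen]
      rw [List.append_assoc, List.take_append, htake]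
      have hb : k.toNat - (out ++ d.getD v []).length = k.toNat - out.length - (d.getD v []).length := by
        simp only [List.length_append]; omega
      rw [hb]

theorem pv_fold_pairs {α : Type} (f : α → Int) (l : List α) (d : PySem.Dict Int (List α)) :
    l.foldl (fun d c => if 0 < f c then d.modify (f c) [] (fun b => b ++ [c]) else d) d
      = (((l.filter (fun c => decide (0 < f c))).map (fun c => (f c, c))).foldl
          (fun d p => d.modify p.1 [] (fun b => b ++ [p.2])) d) := by
  induction l generalizing d with
  | nil => rfl
  | cons c l ih =>
    by_cases h : 0 < f c
    · simp only [List.foldl_cons, h, if_true, List.filter_cons, decide_true, List.map_cons]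
      exact ih _
    · rw [List.foldl_cons, if_neg h]
      have hd : (decide (0 < f c)) = false := by simpa using h
      simp only [List.filter_cons, hd, Bool.false_eq_true, if_false]
      exact ih _

def pvBkt {α : Type} (f : α → Int) (l : List α) : PySem.Dict Int (List α) :=
  l.foldl (fun d c => if 0 < f c then d.modify (f c) [] (fun b => b ++ [c]) else d) PySem.Dict.empty

theorem pv_bkt_getD {α : Type} (f : α → Int) (l : List α) (v : Int) (hv : 0 < v) :
    (pvBkt f l).getD v [] = l.filter (fun c => f c == v) := by
  rw [pvBkt, pv_fold_pairs]
  rw [PySem.Dict.getD_foldl_modify_append]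
  rw [PySem.Dict.getD_empty, List.nil_append]
  rw [List.filter_map, List.map_map]
  have h1 : ((fun p : Int × α => p.1 == v) ∘ (fun c => (f c, c))) = fun c => f c == v := by
    funext c; rfl
  have h2 : ((fun p : Int × α => p.2) ∘ (fun c : α => (f c, c))) = id := by
    funext c; rfl
  rw [h1, h2, List.map_id]
  rw [List.filter_filter]
  apply List.filter_congr
  intro c _
  by_cases h : f c = v
  · simp [h, hv]
  · simp [h]

theorem pv_bkt_mem_keys {α : Type} (f : α → Int) (l : List α) (v : Int) :
    v ∈ (pvBkt f l).keys ↔ 0 < v ∧ v ∈ l.map f := by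
  rw [pvBkt, pv_fold_pairs]
  rw [PySem.Dict.keys_foldl_modify_key _ Prod.fst [] (fun d p => (fun b => b ++ [p.2]))]
  rw [PySem.Dict.keys_empty]
  rw [PySem.Set.mem_update]
  simp only [List.not_mem_nil, false_or, List.map_map]
  constructor
  · intro h
    obtain ⟨c, hc, rfl⟩ := List.mem_map.mp h
    have := List.mem_filter.mp hc
    refine ⟨by simpa using this.2, List.mem_map.mpr ⟨c, this.1, rfl⟩⟩
  · rintro ⟨hv, h⟩
    obtain ⟨c, hc, rfl⟩ := List.mem_map.mp h
    exact List.mem_map.mpr ⟨c, List.mem_filter.mpr ⟨hc, by simpa using hv⟩, rfl⟩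

theorem pv_bkt_nodup_keys {α : Type} (f : α → Int) (l : List α) :
    (pvBkt f l).keys.Nodup := by
  rw [pvBkt, pv_fold_pairs]
  exact PySem.Dict.nodup_keys_foldl_modify_key _ Prod.fst [] (fun d p => (fun b => b ++ [p.2])) _ PySem.Dict.nodup_keys_empty

theorem pv_main (f : List (String × String) → Int) (chunks : List (List (String × String))) (top_k : Int)
    (hk : 0 ≤ top_k) :
    ((PySem.List.slice
        (PySem.List.sorted (PySem.List.pyRange 0 (PySem.List.len (chunks.map f)) 1)
          (fun i => PySem.List.pyGetD (chunks.map f) i 0) true)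
        none (some top_k)).filter
      (fun i => decide (0 < PySem.List.pyGetD (chunks.map f) i 0))).map (fun i => PySem.List.pyGetD chunks i [])
    = pvB_outer top_k (pvBkt f chunks)
        (PySem.List.sorted (pvBkt f chunks).keys (fun v => v) true) [] := by
  have hlen : PySem.List.len (chunks.map f) = ((chunks.length : Nat) : Int) := by
    simp [PySem.List.len]
  set n := chunks.length with hn
  set scores := chunks.map f with hscores
  set keyf := fun i => PySem.List.pyGetD scores i 0 with hkeyf
  set xs0 := PySem.List.pyRange 0 ((n : Nat) : Int) 1 with hxs0def
  have hxs0 : xs0 = (List.range n).map (fun k : Nat => (k : Int)) := PySem.List.pyRange_zero_natCast n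
  have hxs0pair : xs0.Pairwise (· < ·) := by
    rw [hxs0, List.pairwise_map]
    exact List.pairwise_lt_range.imp (fun h => by exact_mod_cast h)
  have hxs0len : xs0.length = n := by rw [hxs0]; simp
  have hscoreslen : scores.length = n := by rw [hscores, hn]; simp
  -- W : all distinct scores, strictly descending
  set W := PySem.List.sorted (PySem.Set.ofList scores) (fun v => v) true with hWdef
  have hWperm : W.Perm (PySem.Set.ofList scores) := PySem.List.sorted_perm _ _ _
  have hWnd : W.Nodup := hWperm.symm.nodup (PySem.Set.nodup_ofList _)
  have hWdesc : W.Pairwise (fun a b => b < a) := by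
    have h1 := PySem.List.sorted_pairwise_rev (PySem.Set.ofList scores) (fun v => v)
    have h2 : W.Pairwise (· ≠ ·) := hWnd
    exact (h1.and h2).imp (fun h => lt_of_le_of_ne h.1 (Ne.symm h.2))
  have hmemW : ∀ v, v ∈ W ↔ v ∈ scores := by
    intro v
    rw [hWdef, PySem.List.mem_sorted]
    exact PySem.Set.mem_ofList scores v
  have hcov : ∀ i ∈ xs0, keyf i ∈ W := by
    intro i hi
    have hb := PySem.List.mem_pyRange_one.mp hi
    have h0 : 0 ≤ i := hb.1
    have h1 : i < (scores.length : Int) := by rw [hscoreslen]; exact hb.2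
    rw [hmemW]
    show PySem.List.pyGetD scores i 0 ∈ scores
    rw [PySem.List.pyGetD_eq_getElem scores 0 h0 h1]
    exact List.getElem_mem _
  -- the stable descending arrangement of the indices
  set ys := W.flatMap (fun v => xs0.filter (fun i => keyf i == v)) with hysdef
  have hperm : ys.Perm xs0 := pv_perm_flatMap_filter keyf W xs0 hWnd hcov
  have hkeq : ∀ (v : Int) (x : Int), x ∈ xs0.filter (fun i => keyf i == v) → keyf x = v := by
    intro v x hx
    simpa using (List.mem_filter.mp hx).2
  have hyspair : ys.Pairwise (fun a b => keyf b < keyf a ∨ (keyf a = keyf b ∧ a < b)) := by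
    rw [hysdef, List.pairwise_flatMap]
    constructor
    · intro v _
      refine (hxs0pair.filter _).imp_of_mem ?_
      intro a b ha hb hab
      exact Or.inr ⟨(hkeq v a ha).trans (hkeq v b hb).symm, hab⟩
    · refine hWdesc.imp_of_mem ?_
      intro v1 v2 _ _ h x hx y hy
      exact Or.inl (by rw [hkeq v1 x hx, hkeq v2 y hy]; exact h)
  have hsorted : PySem.List.sorted xs0 keyf true = ys :=
    pv_stable_sorted_rev keyf xs0 ys hxs0pair hperm hyspair
  -- split off the positive part
  set Wp := W.filter (fun v => decide (0 < v)) with hWpdef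
  set Wn := W.filter (fun v => !(decide (0 < v))) with hWndef
  have hsplit : W = Wp ++ Wn := pv_desc_split W hWdesc
  set P := Wp.flatMap (fun v => xs0.filter (fun i => keyf i == v)) with hPdef
  set N := Wn.flatMap (fun v => xs0.filter (fun i => keyf i == v)) with hNdef
  have hysPN : ys = P ++ N := by
    rw [hysdef]
    conv_lhs => rw [hsplit]
    rw [List.flatMap_append]
  -- the slice is a take of ys
  have hslice : PySem.List.slice ys none (some top_k) = ys.take top_k.toNat :=
    PySem.List.slice_to ys hk
  -- rewrite the goal into take-form on both sides
  rw [hlen, ← hxs0def, hsorted, hslice, hysPN]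
  have hPposmem : ∀ x ∈ P, decide (0 < keyf x) = true := by
    intro x hx
    rw [hPdef] at hx
    obtain ⟨v, hv, hxv⟩ := List.mem_flatMap.mp hx
    have hkv := hkeq v x hxv
    have hvpos : (0:Int) < v := by simpa using (List.mem_filter.mp hv).2
    simp [hkv, hvpos]
  have hNmem : ∀ x ∈ N, ¬((0:Int) < keyf x) := by
    intro x hx
    rw [hNdef] at hx
    obtain ⟨v, hv, hxv⟩ := List.mem_flatMap.mp hx
    have hkv := hkeq v x hxv
    have hvnp : ¬((0:Int) < v) := by simpa using (List.mem_filter.mp hv).2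
    rw [hkv]; exact hvnp
  rw [List.take_append, List.filter_append]
  rw [List.filter_eq_self.mpr (fun x hx => hPposmem x (List.mem_of_mem_take hx))]
  rw [List.filter_eq_nil_iff.mpr (fun x hx => by simpa using hNmem x (List.mem_of_mem_take hx))]
  rw [List.append_nil, List.map_take]
  -- B side: the two loops are a take of the flattened buckets
  rw [pv_outer_spec top_k (pvBkt f chunks)
        (PySem.List.sorted (pvBkt f chunks).keys (fun v => v) true) [] (by simpa using hk)]
  simp only [List.nil_append, List.length_nil, Nat.sub_zero]
  -- identify the two flattened lists
  set V := PySem.List.sorted (pvBkt f chunks).keys (fun v => v) true with hVdef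
  have hVperm : V.Perm (pvBkt f chunks).keys := PySem.List.sorted_perm _ _ _
  have hVnd : V.Nodup := hVperm.symm.nodup (pv_bkt_nodup_keys f chunks)
  have hVdesc : V.Pairwise (fun a b => b < a) := by
    have h1 := PySem.List.sorted_pairwise_rev (pvBkt f chunks).keys (fun v => v)
    have h2 : V.Pairwise (· ≠ ·) := hVnd
    exact (h1.and h2).imp (fun h => lt_of_le_of_ne h.1 (Ne.symm h.2))
  have hVmem : ∀ v, v ∈ V ↔ 0 < v ∧ v ∈ scores := by
    intro v
    rw [hVdef, PySem.List.mem_sorted, pv_bkt_mem_keys f chunks v, ← hscores]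
  have hWpnd : Wp.Nodup := hWnd.filter _
  have hWpdesc : Wp.Pairwise (fun a b => b < a) := hWdesc.filter _
  have hWpmem : ∀ v, v ∈ Wp ↔ 0 < v ∧ v ∈ scores := by
    intro v
    rw [hWpdef, List.mem_filter]
    constructor
    · rintro ⟨h1, h2⟩; exact ⟨by simpa using h2, (hmemW v).mp h1⟩
    · rintro ⟨h1, h2⟩; exact ⟨(hmemW v).mpr h2, by simpa using h1⟩
  have hpermVWp : V.Perm Wp := by
    refine List.perm_of_nodup_nodup_toFinset_eq hVnd hWpnd ?_
    ext v
    simp only [List.mem_toFinset, hVmem v, hWpmem v]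
  have hVWp : V = Wp :=
    List.Perm.eq_of_pairwise (fun a b _ _ h1 h2 => absurd h2 (asymm h1)) hVdesc hWpdesc hpermVWp
  rw [hVWp]
  congr 1
  -- P mapped to chunks = buckets flattened, block by block
  rw [hPdef, List.map_flatMap]
  rw [List.flatMap_def, List.flatMap_def]
  apply congrArg List.flatten
  apply List.map_congr_left
  intro v hv
  have hvpos : (0:Int) < v := ((hWpmem v).mp hv).1
  rw [pv_bkt_getD f chunks v hvpos]
  rw [hxs0def, hkeyf, hscores]
  exact pv_block_map chunks [] f v


-- ===== VERDICT (by name: the statement is the Claim_ definition above) =====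
theorem naive_score_query_to_chunks_spec : Claim_equal_naive_score_query_to_chunks := by
  intro query chunks top_k _ hpre
  unfold Spec_naive_score_query_to_chunks
  show naive_score_query_to_chunks query chunks top_k = naive_score_query_to_chunks_alt query chunks top_k
  unfold naive_score_query_to_chunks naive_score_query_to_chunks_alt
  simp only []
  rw [PySem.List.foldl_append_singleton_eq_map, List.nil_append]
  exact pv_main _ chunks top_k hpre.1
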